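-- pv_equiv track=rewrite | github.com/ParzivalEugene/School-Informatics | 30.01.2023/third_task.py | func
-- ===== SOURCE A (Python) =====
-- def func(num: int, count_even: int = 0) -> int:
--     """
--     Return the number of ways to get 55 from 1 with use of no more than 15 even numbers.
--
--     Args:
--         num (int): The number to get 55 from.
--         count_even (int): The number of even numbers.
--
--     Returns:
--         int: The number of ways to get 55 from 1 with use of no more than 15 even numbers.
--     """
--     if num > 55:
--         return 0
--     if num == 55:
--         return count_even <= 15
--     return sum(
--         (
--             func(num + 2, count_even + int(num % 2 == 0)),
--             func(num + 3, count_even + int(num % 2 == 0)),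
--             func(num * 2 + 1, count_even + int(num % 2 == 0)),
--         )
--     )
-- ===== SOURCE B (Python) =====
-- def _add(a, b):
--     """Element-wise sum of two count vectors (shorter one padded with zeros)."""
--     if not a:
--         return list(b)
--     if not b:
--         return list(a)
--     return [a[0] + b[0]] + _add(a[1:], b[1:])
--
--
-- def _count(row, count_even):
--     """Sum of row[j] over all j with count_even + j <= 15."""
--     if not row:
--         return 0
--     return (row[0] if count_even <= 15 else 0) + _count(row[1:], count_even + 1)
--
--
-- def _tables(n):
--     """For each m in n..55, a vector v with v[j] = number of paths from m to 55
--     passing through exactly j even numbers (counting each visited node < 55)."""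
--     if n == 55:
--         return [[1]]
--     tail = _tables(n + 1)
--     row = []
--     for m in (n + 2, n + 3, 2 * n + 1):
--         if m <= 55:
--             row = _add(row, tail[m - (n + 1)])
--     if n % 2 == 0:
--         row = [0] + row
--     return [row] + tail
--
--
-- def func(num: int, count_even: int = 0) -> int:
--     if num > 55:
--         return 0
--     return _count(_tables(num)[0], count_even)
-- ===== Notes on version B (the rewrite author's own statement) =====
-- stated objective: faster
-- what changed: Replaces A's exponential three-way recursion by a bottom-up DP that builds, for each n from 55 down to num, the vector of path counts indexed by how many even numbers the path visits, then sums the entries with count_even + j <= 15.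
-- outside the precondition, e.g. on func(55, 0): A returns True, B returns 1
import Mathlib
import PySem

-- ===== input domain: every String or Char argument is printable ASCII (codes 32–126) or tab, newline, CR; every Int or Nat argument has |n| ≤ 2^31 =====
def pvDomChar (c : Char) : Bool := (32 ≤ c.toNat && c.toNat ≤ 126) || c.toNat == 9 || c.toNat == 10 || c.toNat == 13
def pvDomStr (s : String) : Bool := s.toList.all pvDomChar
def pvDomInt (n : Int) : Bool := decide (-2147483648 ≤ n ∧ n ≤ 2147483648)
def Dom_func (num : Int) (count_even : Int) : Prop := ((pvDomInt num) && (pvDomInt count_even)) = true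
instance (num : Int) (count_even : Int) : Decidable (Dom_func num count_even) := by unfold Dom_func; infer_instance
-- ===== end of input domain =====

-- B replaces A's exponential recursion by a bottom-up DP over the distribution of
-- paths by even-number count; faster (asymptotic).

-- ===== PORT A =====
-- Fuel makes the recursion total in Lean; on Pre_func (0 ≤ num) the depth is ≤ 56 < 60,
-- so the fuel branch is never taken there.  (On num < 0 the Python recursion never returns:
-- it raises RecursionError; those inputs are excluded by Pre_func.)
def funcAux : Nat → Int → Int → Int
  | 0, _, _ => 0
  | fuel + 1, num, count_even =>
    if num > 55 then 0
    else if num = 55 then (if count_even ≤ 15 then 1 else 0)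
    else
      funcAux fuel (num + 2) (count_even + (if num % 2 = 0 then 1 else 0)) +
      funcAux fuel (num + 3) (count_even + (if num % 2 = 0 then 1 else 0)) +
      funcAux fuel (num * 2 + 1) (count_even + (if num % 2 = 0 then 1 else 0))

def func (num : Int) (count_even : Int) : Int := funcAux 60 num count_even

-- ===== PORT B =====
-- _add: element-wise sum of two count vectors (shorter one padded with zeros)
def addRow : List Int → List Int → List Int
  | [], b => b
  | a, [] => a
  | x :: xs, y :: ys => (x + y) :: addRow xs ys

-- _count: sum of row[j] over all j with count_even + j <= 15
def countRow : List Int → Int → Int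
  | [], _ => 0
  | x :: xs, c => (if c ≤ 15 then x else 0) + countRow xs (c + 1)

-- _tables: for each m in n..55, the vector of path counts from m to 55 by number of evens.
-- (The 'n > 55' arm is a totality guard; B's Python never calls _tables with n > 55.)
def tables (n : Int) : List (List Int) :=
  if n = 55 then [[1]]
  else if 55 < n then []
  else
    let tail := tables (n + 1)
    let row0 : List Int := []
    let row1 := if n + 2 ≤ 55 then addRow row0 ((PySem.List.pyGet? tail (n + 2 - (n + 1))).getD []) else row0
    let row2 := if n + 3 ≤ 55 then addRow row1 ((PySem.List.pyGet? tail (n + 3 - (n + 1))).getD []) else row1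
    let row3 := if 2 * n + 1 ≤ 55 then addRow row2 ((PySem.List.pyGet? tail (2 * n + 1 - (n + 1))).getD []) else row2
    (if n % 2 = 0 then 0 :: row3 else row3) :: tail
termination_by (55 - n).toNat
decreasing_by omega

def func_alt (num : Int) (count_even : Int) : Int :=
  if num > 55 then 0
  else countRow ((PySem.List.pyGet? (tables num) 0).getD []) count_even

-- ===== PRECONDITION & SPEC =====
-- Pre_func excludes num < 0, on which the Python A never returns (the num*2+1 branch
-- recurses forever downward and A dies with RecursionError), and num = 55, on which A
-- returns a bool (count_even <= 15: True/False), not a value of the declared type int.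
def Pre_func (num : Int) (count_even : Int) : Prop := 0 ≤ num ∧ num ≠ 55
instance (num : Int) (count_even : Int) : Decidable (Pre_func num count_even) := by unfold Pre_func; infer_instance
def pvWitness_func : Int × Int := (40, 0)

def Spec_func (num : Int) (count_even : Int) (out : Int) : Prop := out = func_alt num count_even
instance (num : Int) (count_even : Int) (out : Int) : Decidable (Spec_func num count_even out) := by unfold Spec_func; infer_instance

-- ===== CLAIM (what is proved, stated in full; the proofs are below) =====
def Claim_equal_func : Prop := ∀ (num : Int) (count_even : Int), Dom_func num count_even → Pre_func num count_even → Spec_func num count_even (func num count_even)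

-- ===== LEMMAS AND PROOFS =====

-- The mathematical recursion (well-founded, guarded at n < 0), used to bridge A and B.
def g (n c : Int) : Int :=
  if 55 < n then 0
  else if n = 55 then (if c ≤ 15 then 1 else 0)
  else if n < 0 then 0
  else
    g (n + 2) (c + (if n % 2 = 0 then 1 else 0)) +
    g (n + 3) (c + (if n % 2 = 0 then 1 else 0)) +
    g (n * 2 + 1) (c + (if n % 2 = 0 then 1 else 0))
termination_by (56 - n).toNat
decreasing_by all_goals omega

theorem g_gt (n c : Int) (h : 55 < n) : g n c = 0 := by
  unfold g; simp [h]

theorem funcAux_eq_g : ∀ (fuel : Nat) (n c : Int), 0 ≤ n → (56 - n).toNat ≤ fuel →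
    funcAux fuel n c = g n c := by
  intro fuel
  induction fuel with
  | zero =>
    intro n c hn hf
    have h55 : 55 < n := by omega
    rw [funcAux, g_gt _ _ h55]
  | succ fuel ih =>
    intro n c hn hf
    by_cases h1 : 55 < n
    · rw [funcAux, if_pos h1, g_gt _ _ h1]
    · by_cases h2 : n = 55
      · subst h2
        rw [funcAux, g]
        norm_num
      · have hlt : n < 55 := by omega
        have hneg : ¬ n < 0 := by omega
        rw [funcAux, if_neg (by omega : ¬ n > 55), if_neg h2]
        rw [g, if_neg h1, if_neg h2, if_neg hneg]
        rw [ih (n + 2) _ (by omega) (by omega),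
            ih (n + 3) _ (by omega) (by omega),
            ih (n * 2 + 1) _ (by omega) (by omega)]

theorem countRow_addRow : ∀ (a b : List Int) (c : Int),
    countRow (addRow a b) c = countRow a c + countRow b c := by
  intro a
  induction a with
  | nil => intro b c; simp [addRow, countRow]
  | cons x xs ih =>
    intro b c
    cases b with
    | nil => simp [addRow, countRow]
    | cons y ys =>
      simp only [addRow, countRow, ih]
      split_ifs <;> ring

-- the head row of (tables n), as zeta-reduction leaves it
def rowOf (n : Int) : List Int :=
  let tail := tables (n + 1)
  let row0 : List Int := []
  let row1 := if n + 2 ≤ 55 then addRow row0 ((PySem.List.pyGet? tail (n + 2 - (n + 1))).getD []) else row0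
  let row2 := if n + 3 ≤ 55 then addRow row1 ((PySem.List.pyGet? tail (n + 3 - (n + 1))).getD []) else row1
  let row3 := if 2 * n + 1 ≤ 55 then addRow row2 ((PySem.List.pyGet? tail (2 * n + 1 - (n + 1))).getD []) else row2
  if n % 2 = 0 then 0 :: row3 else row3

theorem tables_55 : tables 55 = [[1]] := by
  conv_lhs => rw [tables]
  norm_num

theorem tables_cons (n : Int) (h1 : ¬ n = 55) (h2 : ¬ 55 < n) :
    tables n = rowOf n :: tables (n + 1) := by
  conv_lhs => rw [tables]
  rw [if_neg h1, if_neg h2]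
  rfl

theorem tables_ne_nil (n : Int) (h : n ≤ 55) : tables n ≠ [] := by
  by_cases h1 : n = 55
  · subst h1; rw [tables_55]; simp
  · rw [tables_cons n h1 (by omega)]; simp

-- element m - n of (tables n) is the head row of (tables m)
theorem tables_get : ∀ (k : Nat) (n : Int), n + k ≤ 55 →
    PySem.List.pyGet? (tables n) (k : Int) = some ((tables (n + k)).headD []) := by
  intro k
  induction k with
  | zero =>
    intro n h
    have hne := tables_ne_nil n (by omega)
    cases htab : tables n with
    | nil => exact absurd htab hne
    | cons r t =>
      simp [htab]
  | succ k ih =>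
    intro n h
    have hlt : ¬ n = 55 := by push_cast at h; omega
    have hgt : ¬ 55 < n := by push_cast at h; omega
    rw [tables_cons n hlt hgt]
    have hc : ((k + 1 : Nat) : Int) = (k : Int) + 1 := by push_cast; ring
    rw [hc, PySem.List.pyGet?_cons_succ]
    have harg : n + ((k : Int) + 1) = (n + 1) + (k : Int) := by ring
    rw [harg]
    exact ih (n + 1) (by push_cast at h ⊢; omega)

theorem countRow_shift (r : List Int) (c : Int) :
    countRow (0 :: r) c = countRow r (c + 1) := by
  simp [countRow]

-- one loop step of _tables: folding in one child row
theorem countRow_step (n m : Int) (prev : List Int) (c' : Int)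
    (h : m ≤ 55 → countRow ((PySem.List.pyGet? (tables (n + 1)) (m - (n + 1))).getD []) c' = g m c') :
    countRow (if m ≤ 55 then addRow prev ((PySem.List.pyGet? (tables (n + 1)) (m - (n + 1))).getD []) else prev) c'
      = countRow prev c' + g m c' := by
  split_ifs with hm
  · rw [countRow_addRow, h hm]
  · rw [g_gt m c' (by omega)]; ring

theorem head_tables_correct : ∀ (k : Nat) (n : Int), 0 ≤ n → n ≤ 55 → (55 - n).toNat = k →
    ∀ c, countRow ((tables n).headD []) c = g n c := by
  intro k
  induction k using Nat.strong_induction_on with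
  | _ k ih =>
    intro n hn h55 hk c
    by_cases h1 : n = 55
    · subst h1
      rw [tables_55, g]
      simp [countRow]
    · have hlt : n < 55 := by omega
      have hgt : ¬ 55 < n := by omega
      have child : ∀ (m : Int), n + 1 ≤ m → m ≤ 55 →
          ∀ c', countRow ((PySem.List.pyGet? (tables (n + 1)) (m - (n + 1))).getD []) c' = g m c' := by
        intro m hm hm55 c'
        have hcast : m - (n + 1) = ((m - (n + 1)).toNat : Int) := (Int.toNat_of_nonneg (by omega)).symm
        rw [hcast, tables_get (m - (n + 1)).toNat (n + 1) (by omega)]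
        have harg : n + 1 + ((m - (n + 1)).toNat : Int) = m := by omega
        rw [harg, Option.getD_some]
        exact ih (55 - m).toNat (by omega) m (by omega) hm55 rfl c'
      rw [tables_cons n h1 hgt, List.headD_cons]
      rw [g, if_neg hgt, if_neg h1, if_neg (by omega : ¬ n < 0)]
      have hmul : g (2 * n + 1) = g (n * 2 + 1) := by rw [mul_comm]
      simp only [rowOf]
      by_cases hpar : n % 2 = 0
      · rw [if_pos hpar, countRow_shift]
        rw [countRow_step n (2 * n + 1) _ _ (fun hm => child (2 * n + 1) (by omega) hm _)]
        rw [countRow_step n (n + 3) _ _ (fun hm => child (n + 3) (by omega) hm _)]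
        rw [countRow_step n (n + 2) _ _ (fun hm => child (n + 2) (by omega) hm _)]
        rw [hmul]
        simp [countRow, hpar]
      · rw [if_neg hpar]
        rw [countRow_step n (2 * n + 1) _ _ (fun hm => child (2 * n + 1) (by omega) hm _)]
        rw [countRow_step n (n + 3) _ _ (fun hm => child (n + 3) (by omega) hm _)]
        rw [countRow_step n (n + 2) _ _ (fun hm => child (n + 2) (by omega) hm _)]
        rw [hmul]
        simp [countRow, hpar]

-- ===== VERDICT (by name: the statement is the Claim_ definition above) =====
theorem func_spec : Claim_equal_func := by
  intro num count_even _hdom hpre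
  have hp : (0 : Int) ≤ num := hpre.1
  unfold Spec_func func func_alt
  by_cases h : num > 55
  · rw [if_pos h]
    rw [funcAux_eq_g 60 num count_even hp (by omega), g_gt _ _ h]
  · rw [if_neg h]
    rw [funcAux_eq_g 60 num count_even hp (by omega)]
    have h0 : PySem.List.pyGet? (tables num) ((0 : Nat) : Int) = some ((tables (num + 0)).headD []) :=
      tables_get 0 num (by omega)
    simp only [Int.natCast_zero, add_zero] at h0
    rw [h0, Option.getD_some]
    exact (head_tables_correct (55 - num).toNat num hp (by omega) rfl count_even).symm
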